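-- pv_equiv track=rewrite | github.com/ENTERPILOT/ai-model-list | pipeline/normalize.py | _strip_nested_provider_prefixes
-- ===== SOURCE A (Python) =====
-- PROVIDER_SLUG_ALIASES = {
--     "x-ai": "xai",
--     "aws": "bedrock",
--     "azure_ai": "azure",
--     "azure-openai": "azure",
--     "google": "gemini",
--     "fireworks-ai": "fireworks",
--     "fireworks_ai": "fireworks",
--     "mistral-ai": "mistral",
--     "text-completion-openai": "openai",
--     "together-ai": "together",
--     "together_ai": "together",
--     "vertex-ai": "vertex_ai",
--     "vertex_ai-embedding-models": "vertex_ai",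
--     "vertex_ai-language-models": "vertex_ai",
--     "vertex_ai-text-models": "vertex_ai",
-- }
--
-- KNOWN_PROVIDER_SLUGS = {
--     "anthropic",
--     "azure",
--     "bedrock",
--     "cerebras",
--     "cohere",
--     "deepinfra",
--     "deepseek",
--     "fireworks",
--     "gemini",
--     "google",
--     "groq",
--     "mistral",
--     "openai",
--     "ovhcloud",
--     "runway",
--     "together",
--     "vertex_ai",
--     "x-ai",
--     "xai",
-- }
--
-- def normalize_provider_slug(value: str | None) -> str | None:
--     if value is None:
--         return None
--
--     normalized = value.strip().lower()
--     if not normalized: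
--         return None
--
--     return PROVIDER_SLUG_ALIASES.get(normalized, normalized)
--
-- def _strip_nested_provider_prefixes(model_name: str | None) -> str | None:
--     canonical_hint = model_name
--     while canonical_hint and "/" in canonical_hint:
--         provider_candidate, _, remainder = canonical_hint.partition("/")
--         normalized = normalize_provider_slug(provider_candidate)
--         if normalized not in KNOWN_PROVIDER_SLUGS:
--             break
--         canonical_hint = remainder or None
--     return canonical_hint
-- ===== SOURCE B (Python) =====
-- PROVIDER_SLUG_ALIASES = {
--     "x-ai": "xai",
--     "aws": "bedrock",
--     "azure_ai": "azure",
--     "azure-openai": "azure",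
--     "google": "gemini",
--     "fireworks-ai": "fireworks",
--     "fireworks_ai": "fireworks",
--     "mistral-ai": "mistral",
--     "text-completion-openai": "openai",
--     "together-ai": "together",
--     "together_ai": "together",
--     "vertex-ai": "vertex_ai",
--     "vertex_ai-embedding-models": "vertex_ai",
--     "vertex_ai-language-models": "vertex_ai",
--     "vertex_ai-text-models": "vertex_ai",
-- }
--
-- KNOWN_PROVIDER_SLUGS = {
--     "anthropic", "azure", "bedrock", "cerebras", "cohere", "deepinfra",
--     "deepseek", "fireworks", "gemini", "google", "groq", "mistral",
--     "openai", "ovhcloud", "runway", "together", "vertex_ai", "x-ai", "xai",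
-- }
--
-- # Every alias maps into KNOWN_PROVIDER_SLUGS, so "normalize(p) in KNOWN" is
-- # simply membership of the stripped, lowercased segment in this flat union.
-- _ACCEPTED_PREFIXES = KNOWN_PROVIDER_SLUGS | set(PROVIDER_SLUG_ALIASES)
--
-- def _drop_known(parts):
--     if len(parts) >= 2 and parts[0].strip().lower() in _ACCEPTED_PREFIXES:
--         return _drop_known(parts[1:])
--     return parts
--
-- def _strip_nested_provider_prefixes(model_name):
--     if model_name is None:
--         return None
--     parts = model_name.split("/")
--     rest = _drop_known(parts)
--     if len(rest) == len(parts):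
--         return model_name
--     return "/".join(rest) or None
-- ===== Notes on version B (the rewrite author's own statement) =====
-- stated objective: simpler
-- what changed: Instead of A's while loop that repeatedly partitions the string at the first slash and re-checks via the alias dict + known set inside normalize_provider_slug, B splits the name on slashes once, recursively drops leading parts (never the last) whose stripped lowercased text lies in one flat precomputed union set (known slugs | alias keys, valid because every alias value is itself a known slug), and joins the remainder once, collapsing an empty remainder to None only when something was dropped.
import Mathlib
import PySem

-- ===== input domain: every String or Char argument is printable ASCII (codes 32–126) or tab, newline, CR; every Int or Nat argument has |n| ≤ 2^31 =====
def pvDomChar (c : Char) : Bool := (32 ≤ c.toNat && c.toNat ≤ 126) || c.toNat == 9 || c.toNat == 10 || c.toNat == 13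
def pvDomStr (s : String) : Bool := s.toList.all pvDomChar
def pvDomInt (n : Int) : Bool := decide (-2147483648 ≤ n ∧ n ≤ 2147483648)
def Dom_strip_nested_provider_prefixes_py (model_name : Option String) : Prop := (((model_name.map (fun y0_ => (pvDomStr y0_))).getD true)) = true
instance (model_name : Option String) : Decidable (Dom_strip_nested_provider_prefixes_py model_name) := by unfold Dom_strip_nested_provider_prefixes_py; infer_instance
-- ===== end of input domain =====

-- B replaces A's repeated partition-and-reassign loop (alias dict + known set consulted
-- through normalize_provider_slug) by one split('/'), a recursive drop of accepted leading
-- parts tested against a single flat union set, and one join (objective: simpler).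

-- ===== PORT A =====
-- shared module context: PROVIDER_SLUG_ALIASES, KNOWN_PROVIDER_SLUGS, normalize_provider_slug
def pvAliases : PySem.Dict (List Char) (List Char) := PySem.Dict.ofList [
  ("x-ai".toList, "xai".toList),
  ("aws".toList, "bedrock".toList),
  ("azure_ai".toList, "azure".toList),
  ("azure-openai".toList, "azure".toList),
  ("google".toList, "gemini".toList),
  ("fireworks-ai".toList, "fireworks".toList),
  ("fireworks_ai".toList, "fireworks".toList),
  ("mistral-ai".toList, "mistral".toList),
  ("text-completion-openai".toList, "openai".toList),
  ("together-ai".toList, "together".toList),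
  ("together_ai".toList, "together".toList),
  ("vertex-ai".toList, "vertex_ai".toList),
  ("vertex_ai-embedding-models".toList, "vertex_ai".toList),
  ("vertex_ai-language-models".toList, "vertex_ai".toList),
  ("vertex_ai-text-models".toList, "vertex_ai".toList)]

def pvKnown : PySem.Set (List Char) := PySem.Set.ofList [
  "anthropic".toList, "azure".toList, "bedrock".toList, "cerebras".toList,
  "cohere".toList, "deepinfra".toList, "deepseek".toList, "fireworks".toList,
  "gemini".toList, "google".toList, "groq".toList, "mistral".toList,
  "openai".toList, "ovhcloud".toList, "runway".toList, "together".toList,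
  "vertex_ai".toList, "x-ai".toList, "xai".toList]

def normalize_provider_slug_py (value : Option (List Char)) : Option (List Char) :=
  match value with
  | none => none
  | some v =>
    let normalized := PySem.Chars.lower (PySem.Chars.strip v)
    if normalized = [] then none
    else some (pvAliases.getD normalized normalized)

-- 'normalized in KNOWN_PROVIDER_SLUGS' where normalized : str | None (None is never a member)
def pvKnownOpt (o : Option (List Char)) : Bool :=
  match o with
  | none => false
  | some n => pvKnown.contains n

-- termination helper for A's while loop: the remainder after the first '/' is shorter
theorem pv_rem_lt (cs : List Char) (h : '/' ∈ cs) :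
    ((cs.dropWhile (fun c => c ≠ '/')).tail).length < cs.length := by
  have hne : cs.dropWhile (fun c => c ≠ '/') ≠ [] := by
    intro h0
    rw [List.dropWhile_eq_nil_iff] at h0
    have := h0 '/' h
    simp at this
  have h1 := List.length_dropWhile_le (fun c => decide (c ≠ '/')) cs
  have h2 : (cs.dropWhile (fun c => c ≠ '/')).length ≠ 0 := by
    simpa [List.length_eq_zero_iff] using hne
  rw [List.length_tail]
  omega

-- the while loop of A; cs is the current truthy canonical_hint (the '' case never recurses)
def pvStripLoop (cs : List Char) : Option (List Char) :=
  if h : PySem.Chars.isIn ['/'] cs = true then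
    -- provider_candidate, _, remainder = canonical_hint.partition("/")  (exact for a 1-char sep)
    let provider := cs.takeWhile (fun c => c ≠ '/')
    let remainder := (cs.dropWhile (fun c => c ≠ '/')).tail
    if pvKnownOpt (normalize_provider_slug_py (some provider)) then
      match remainder with
      | [] => none                -- canonical_hint = remainder or None; loop condition now falsy
      | _ => pvStripLoop remainder
    else some cs                  -- break
  else some cs
termination_by cs.length
decreasing_by
  exact pv_rem_lt cs (by
    have := (PySem.Chars.isIn_iff_infix ['/'] cs).mp h
    exact (List.singleton_sublist).mp this.sublist)

def strip_nested_provider_prefixes_py (model_name : Option String) : Option String :=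
  match model_name with
  | none => none
  | some s => (pvStripLoop s.toList).map (fun cs => String.ofList cs)

-- ===== PORT B =====
-- _ACCEPTED_PREFIXES = KNOWN_PROVIDER_SLUGS | set(PROVIDER_SLUG_ALIASES): the flat union of
-- the known slugs and the alias keys (every alias value already lies in the known set)
def pvAccepted : PySem.Set (List Char) := PySem.Set.ofList [
  "anthropic".toList, "azure".toList, "bedrock".toList, "cerebras".toList,
  "cohere".toList, "deepinfra".toList, "deepseek".toList, "fireworks".toList,
  "gemini".toList, "google".toList, "groq".toList, "mistral".toList,
  "openai".toList, "ovhcloud".toList, "runway".toList, "together".toList,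
  "vertex_ai".toList, "x-ai".toList, "xai".toList,
  "aws".toList, "azure_ai".toList, "azure-openai".toList,
  "fireworks-ai".toList, "fireworks_ai".toList, "mistral-ai".toList,
  "text-completion-openai".toList, "together-ai".toList, "together_ai".toList,
  "vertex-ai".toList, "vertex_ai-embedding-models".toList,
  "vertex_ai-language-models".toList, "vertex_ai-text-models".toList]

-- _drop_known: recursively drop leading parts (never the last) whose stripped,
-- lowercased text is an accepted prefix
def pvDropKnown : List (List Char) → List (List Char)
  | p :: q :: rest =>
    if pvAccepted.contains (PySem.Chars.lower (PySem.Chars.strip p)) then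
      pvDropKnown (q :: rest)
    else p :: q :: rest
  | parts => parts

def strip_nested_provider_prefixes_py_alt (model_name : Option String) : Option String :=
  match model_name with
  | none => none
  | some s =>
    let parts := List.splitOn '/' s.toList
    let rest := pvDropKnown parts
    if rest.length = parts.length then some s
    else
      let joined := ['/'].intercalate rest     -- "/".join(rest)
      if joined = [] then none else some (String.ofList joined)

-- ===== PRECONDITION & SPEC =====
def Spec_strip_nested_provider_prefixes_py (model_name : Option String) (out : Option String) : Prop := out = strip_nested_provider_prefixes_py_alt model_name
instance (model_name : Option String) (out : Option String) : Decidable (Spec_strip_nested_provider_prefixes_py model_name out) := by unfold Spec_strip_nested_provider_prefixes_py; infer_instance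

-- ===== CLAIM (what is proved, stated in full; the proofs are below) =====
def Claim_equal_strip_nested_provider_prefixes_py : Prop := ∀ (model_name : Option String), Dom_strip_nested_provider_prefixes_py model_name → Spec_strip_nested_provider_prefixes_py model_name (strip_nested_provider_prefixes_py model_name)

-- ===== LEMMAS AND PROOFS =====

theorem pv_isIn_slash (cs : List Char) : PySem.Chars.isIn ['/'] cs = true ↔ '/' ∈ cs := by
  rw [PySem.Chars.isIn_iff_infix]
  exact List.singleton_infix_iff '/' cs

-- A's membership test after normalization coincides with B's flat-union membership
theorem pv_aliases_keys : pvAliases.keys = [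
    "x-ai".toList, "aws".toList, "azure_ai".toList, "azure-openai".toList,
    "google".toList, "fireworks-ai".toList, "fireworks_ai".toList, "mistral-ai".toList,
    "text-completion-openai".toList, "together-ai".toList, "together_ai".toList,
    "vertex-ai".toList, "vertex_ai-embedding-models".toList,
    "vertex_ai-language-models".toList, "vertex_ai-text-models".toList] := by decide

set_option maxHeartbeats 4000000 in
theorem pv_accept_core (n : List Char) :
    pvKnown.contains (pvAliases.getD n n) = pvAccepted.contains n := by
  by_cases hk : pvAliases.contains n = true
  · have hmem := (PySem.Dict.contains_iff_mem_keys pvAliases n).mp hk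
    have hall : ∀ k, k ∈ pvAliases.keys →
        pvKnown.contains (pvAliases.getD k k) = pvAccepted.contains k := by decide
    exact hall n hmem
  · rw [Bool.not_eq_true] at hk
    rw [PySem.Dict.getD_of_not_contains pvAliases n hk]
    have hnk : n ∉ pvAliases.keys := by
      intro hm
      rw [← PySem.Dict.contains_iff_mem_keys] at hm
      rw [hk] at hm; exact Bool.false_ne_true hm
    rw [pv_aliases_keys] at hnk
    simp only [List.mem_cons, List.not_mem_nil, or_false, not_or] at hnk
    rw [Bool.eq_iff_iff]
    simp only [PySem.Set.contains, List.contains_iff_mem, pvKnown, pvAccepted,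
      PySem.Set.mem_ofList, List.mem_cons, List.not_mem_nil, or_false]
    obtain ⟨h1,h2,h3,h4,h5,h6,h7,h8,h9,h10,h11,h12,h13,h14,h15⟩ := hnk
    simp at h1 h2 h3 h4 h5 h6 h7 h8 h9 h10 h11 h12 h13 h14 h15
    simp [h1,h2,h3,h4,h5,h6,h7,h8,h9,h10,h11,h12,h13,h14,h15]

theorem pv_accept (p : List Char) :
    pvKnownOpt (normalize_provider_slug_py (some p)) =
      pvAccepted.contains (PySem.Chars.lower (PySem.Chars.strip p)) := by
  by_cases h0 : PySem.Chars.lower (PySem.Chars.strip p) = []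
  · simp only [normalize_provider_slug_py, pvKnownOpt, h0]
    decide
  · simp only [normalize_provider_slug_py, pvKnownOpt, h0, if_false]
    exact pv_accept_core _

theorem pv_drop_le (l : List (List Char)) : (pvDropKnown l).length ≤ l.length := by
  fun_induction pvDropKnown l with
  | case1 p q rest hacc ih => simp only [List.length_cons] at *; omega
  | case2 p q rest hacc => simp
  | case3 parts h => exact le_refl _

theorem pv_drop_eq_of_length (l : List (List Char)) (h : (pvDropKnown l).length = l.length) :
    pvDropKnown l = l := by
  match l with
  | [] => rfl
  | [p] => rfl
  | p :: q :: rest =>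
    rw [pvDropKnown] at h ⊢
    by_cases hacc : pvAccepted.contains (PySem.Chars.lower (PySem.Chars.strip p)) = true
    · exfalso
      rw [if_pos hacc] at h
      have := pv_drop_le (q :: rest)
      simp only [List.length_cons] at h this
      omega
    · rw [if_neg hacc]

-- A's loop computed the B way, on the char-list level
theorem pv_main (cs : List Char) :
    pvStripLoop cs =
      (let parts := List.splitOn '/' cs
       let rest := pvDropKnown parts
       if rest.length = parts.length then some cs
       else if ['/'].intercalate rest = [] then none
            else some (['/'].intercalate rest)) := by
  induction hn : cs.length using Nat.strong_induction_on generalizing cs with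
  | _ n ih =>
  by_cases hmem : '/' ∈ cs
  · -- cs = a ++ '/' :: b
    have hne : cs.dropWhile (fun c => c ≠ '/') ≠ [] := by
      intro h0
      rw [List.dropWhile_eq_nil_iff] at h0
      have := h0 '/' hmem; simp at this
    set a := cs.takeWhile (fun c => c ≠ '/') with ha
    set b := (cs.dropWhile (fun c => c ≠ '/')).tail with hb
    have hdw : cs.dropWhile (fun c => c ≠ '/') = '/' :: b := by
      cases hdw0 : cs.dropWhile (fun c => c ≠ '/') with
      | nil => exact absurd hdw0 hne
      | cons y ys =>
        have hy : y = '/' := by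
          have hdw0' : List.dropWhile (fun c => !decide (c = '/')) cs = y :: ys := by
            simpa using hdw0
          have hh := List.head_dropWhile_not (fun c => decide (c ≠ '/')) hne
          simp [hdw0'] at hh
          simpa using hh
        rw [hb, hdw0, hy]
        simp
    have hcs : cs = a ++ '/' :: b := by
      conv_lhs => rw [← List.takeWhile_append_dropWhile (p := fun c => decide (c ≠ '/')) (l := cs)]
      rw [← ha, hdw]
    have hanos : ∀ x ∈ a, ¬ (x == '/') = true := by
      intro x hx
      have := List.mem_takeWhile_imp hx
      simpa using this
    have hsplit : List.splitOn '/' cs = a :: List.splitOn '/' b := by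
      rw [hcs]
      exact List.splitOnP_first _ a hanos '/' (by simp) b
    have hIsIn : PySem.Chars.isIn ['/'] cs = true := (pv_isIn_slash cs).mpr hmem
    have hlenb : b.length < n := by
      have : cs.length = a.length + 1 + b.length := by rw [hcs]; simp; omega
      omega
    obtain ⟨q, ps, hps⟩ : ∃ q ps, List.splitOn '/' b = q :: ps := by
      cases hps0 : List.splitOn '/' b with
      | nil => exact absurd hps0 (List.splitOnP_ne_nil _ _)
      | cons q ps => exact ⟨q, ps, rfl⟩
    have hacc := pv_accept a
    by_cases hknown : pvKnownOpt (normalize_provider_slug_py (some a)) = true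
    · -- provider accepted: A recurses (or stops at None); B drops the first part
      have haccT : pvAccepted.contains (PySem.Chars.lower (PySem.Chars.strip a)) = true := by
        rw [← hacc]; exact hknown
      have hdrop : pvDropKnown (List.splitOn '/' cs) = pvDropKnown (q :: ps) := by
        rw [hsplit, hps, pvDropKnown, if_pos haccT]
      have hlt : (pvDropKnown (List.splitOn '/' cs)).length < (List.splitOn '/' cs).length := by
        rw [hdrop, hsplit, hps]
        have := pv_drop_le (q :: ps)
        simp only [List.length_cons] at *
        omega
      cases hbe : b with
      | nil =>
        -- remainder empty → A returns none; B: parts = [a, ""], rest = [""], join = "" → none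
        rw [pvStripLoop]
        simp only [hIsIn, dite_true, ← ha, ← hb, hknown, if_true, hbe]
        obtain ⟨rfl, rfl⟩ : q = [] ∧ ps = [] := by
          have : List.splitOn '/' ([] : List Char) = [[]] := by decide
          rw [hbe, this] at hps
          injection hps with h1 h2
          exact ⟨h1.symm, h2.symm⟩
        rw [hdrop]
        simp [pvDropKnown, hsplit, hbe, List.intercalate]
      | cons x xs =>
        rw [pvStripLoop]
        simp only [hIsIn, dite_true, ← ha, ← hb, hknown, if_true, hbe]
        rw [← hbe]
        have hrec := ih b.length hlenb b rfl
        rw [hrec]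
        simp only [hps]
        have hlen2 : (List.splitOn '/' cs).length = ps.length + 2 := by
          rw [hsplit, hps]; simp
        have hd := pv_drop_le (q :: ps)
        simp only [List.length_cons] at hd
        rw [hdrop, hlen2,
          if_neg (by omega : ¬ (pvDropKnown (q :: ps)).length = ps.length + 2)]
        by_cases hi0 : (pvDropKnown (q :: ps)).length = (q :: ps).length
        · have hrest : pvDropKnown (q :: ps) = q :: ps := pv_drop_eq_of_length _ hi0
          have hjoin : ['/'].intercalate (q :: ps) = b := by
            rw [← hps]; exact List.intercalate_splitOn b '/'
          have hbne : b ≠ [] := by rw [hbe]; simp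
          rw [if_pos hi0, hrest, hjoin, if_neg hbne]
        · rw [if_neg hi0]
    · -- provider not accepted: both return cs unchanged
      have haccF : pvAccepted.contains (PySem.Chars.lower (PySem.Chars.strip a)) = false := by
        rw [← hacc]; exact Bool.eq_false_iff.mpr hknown
      have hone : pvDropKnown (a :: q :: ps) = a :: q :: ps := by
        rw [pvDropKnown, haccF]; simp
      rw [pvStripLoop]
      simp only [hIsIn, dite_true, ← ha, ← hb, hknown]
      rw [hsplit, hps, hone]
      simp
  · -- no '/': A stops immediately; B: parts = [cs], nothing dropped
    have hIsIn : PySem.Chars.isIn ['/'] cs = false := by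
      rw [← Bool.not_eq_true, pv_isIn_slash]; exact hmem
    rw [pvStripLoop]
    have hsplit : List.splitOn '/' cs = [cs] := by
      apply List.splitOnP_eq_single
      intro x hx
      simp only [beq_iff_eq]
      exact fun hxe => hmem (hxe ▸ hx)
    simp [hIsIn, hsplit, pvDropKnown]

-- ===== VERDICT (by name: the statement is the Claim_ definition above) =====
theorem strip_nested_provider_prefixes_py_spec : Claim_equal_strip_nested_provider_prefixes_py := by
  intro model_name _
  unfold Spec_strip_nested_provider_prefixes_py
  cases model_name with
  | none => rfl
  | some s =>
    show (pvStripLoop s.toList).map (fun cs => String.ofList cs) = _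
    rw [pv_main s.toList]
    simp only [strip_nested_provider_prefixes_py_alt]
    by_cases hl : (pvDropKnown (List.splitOn '/' s.toList)).length = (List.splitOn '/' s.toList).length
    · simp [hl, String.ofList_toList]
    · by_cases hr : ['/'].intercalate (pvDropKnown (List.splitOn '/' s.toList)) = []
      · simp [hl, hr]
      · simp [hl, hr]
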